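-- pv_equiv track=rewrite | github.com/niteshsinghtakuli-cmyk/nitesh-vip | models.py | streak_ai
-- ===== SOURCE A (Python) =====
-- def streak_ai(data):
--     last = data[0]
--     count = 0
--     for d in data:
--         if d == last:
--             count += 1
--         else:
--             break
--
--     if count >= 2:
--         return "BIG" if last == "SMALL" else "SMALL"
--     return last
-- ===== SOURCE B (Python) =====
-- def streak_ai(data):
--     last = data[0]
--     if len(data) >= 2 and data[1] == last:
--         return "BIG" if last == "SMALL" else "SMALL"
--     return last
-- ===== Notes on version B (the rewrite author's own statement) =====
-- stated objective: simpler
-- what changed: Replaces the leading-streak counting loop with a closed-form check: count>=2 holds exactly when the second element equals the first, so B just compares data[1] with data[0].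
import Mathlib
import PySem

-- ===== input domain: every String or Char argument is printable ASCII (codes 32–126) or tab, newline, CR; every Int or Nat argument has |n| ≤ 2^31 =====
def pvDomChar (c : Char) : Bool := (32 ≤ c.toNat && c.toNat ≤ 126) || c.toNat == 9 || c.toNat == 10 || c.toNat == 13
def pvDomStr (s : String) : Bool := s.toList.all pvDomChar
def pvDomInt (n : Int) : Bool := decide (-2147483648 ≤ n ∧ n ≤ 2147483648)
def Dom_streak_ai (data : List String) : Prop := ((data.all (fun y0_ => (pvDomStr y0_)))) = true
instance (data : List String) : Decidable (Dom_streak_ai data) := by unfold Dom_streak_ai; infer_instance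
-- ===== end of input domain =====

-- B changes the strategy: the leading-streak counting loop is replaced by a closed-form
-- comparison of data[1] with data[0] (count>=2 iff the first two elements are equal).

-- ===== PORT A =====
-- 'for d in data: if d == last: count += 1 else: break' as structural recursion
def streak_aiCount (last : String) : List String → Int
  | [] => 0
  | d :: rest => if d == last then 1 + streak_aiCount last rest else 0

def streak_ai (data : List String) : String :=
  match data with
  | [] => ""  -- unreachable under Pre_streak_ai (Python raises IndexError on data[0])
  | last :: _ =>
    let count := streak_aiCount last data
    if count ≥ 2 then (if last == "SMALL" then "BIG" else "SMALL") else last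

-- ===== PORT B =====
def streak_ai_alt (data : List String) : String :=
  match data with
  | [] => ""  -- unreachable under Pre_streak_ai
  | last :: rest =>
    if (match rest with | d :: _ => d == last | [] => false) then
      (if last == "SMALL" then "BIG" else "SMALL")
    else last

-- ===== PRECONDITION & SPEC =====
-- Python A raises IndexError on the empty list (data[0]); Pre_ excludes exactly that.
def Pre_streak_ai (data : List String) : Prop := data ≠ []
instance (data : List String) : Decidable (Pre_streak_ai data) := by unfold Pre_streak_ai; infer_instance
def pvWitness_streak_ai : List String := ["BIG", "BIG", "SMALL"]

def Spec_streak_ai (data : List String) (out : String) : Prop := out = streak_ai_alt data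
instance (data : List String) (out : String) : Decidable (Spec_streak_ai data out) := by unfold Spec_streak_ai; infer_instance

-- ===== CLAIM (what is proved, stated in full; the proofs are below) =====
def Claim_equal_streak_ai : Prop := ∀ (data : List String), Dom_streak_ai data → Pre_streak_ai data → Spec_streak_ai data (streak_ai data)

-- ===== LEMMAS AND PROOFS =====
theorem streak_aiCount_nonneg (last : String) (l : List String) : 0 ≤ streak_aiCount last l := by
  induction l with
  | nil => simp [streak_aiCount]
  | cons d rest ih => by_cases h : d == last <;> simp [streak_aiCount, h] <;> omega

-- ===== VERDICT (by name: the statement is the Claim_ definition above) =====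
theorem streak_ai_spec : Claim_equal_streak_ai := by
  intro data _ hpre
  unfold Spec_streak_ai
  match data with
  | [] => exact absurd rfl hpre
  | last :: rest =>
    match rest with
    | [] => simp [streak_ai, streak_ai_alt, streak_aiCount]
    | d :: rs =>
      by_cases h : d == last
      · have hnn := streak_aiCount_nonneg last rs
        simp [streak_ai, streak_ai_alt, streak_aiCount, h]
        omega
      · simp [streak_ai, streak_ai_alt, streak_aiCount, h]
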